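-- pv_equiv track=rewrite | github.com/jramaswami/Binary_Search_Python | lego_towers.py | solve
-- ===== SOURCE A (Python) =====
-- from collections import deque
--
-- def solve(heights, k):
--     # Base case
--     if k == 1:
--         return 0
--
--     heights0 = sorted(heights)
--
--     towers = deque(heights0[:k])
--     soln = sum(towers[-1] - t for t in towers)
--     curr = soln
--     for i in range(k, len(heights0)):
--         # Remove the delta from the first tower
--         curr -= (towers[-1] - towers[0])
--         # Remove the tower
--         towers.popleft()
--         # We are going to add the tower at index i. So, we need to add
--         # the difference for each tower still towers.
--         curr += (k - 1) * (heights0[i] - towers[-1])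
--         # Now put the new tower in the towers.
--         towers.append(heights0[i])
--         soln = min(soln, curr)
--     return soln
-- ===== SOURCE B (Python) =====
-- def solve(heights, k):
--     if k == 1:
--         return 0
--     hs = sorted(heights)
--     n = len(hs)
--     # prefix sums: P[m] = sum(hs[:m])
--     P = [0]
--     for h in hs:
--         P.append(P[-1] + h)
--     m = min(k, n)  # length of the first (possibly partial) window
--     if m == 0:
--         return 0
--     best = m * hs[m - 1] - P[m]
--     for i in range(1, n - k + 1):
--         best = min(best, k * hs[i + k - 1] - (P[i + k] - P[i]))
--     return best
-- ===== Notes on version B (the rewrite author's own statement) =====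
-- stated objective: simpler
-- what changed: Replaces A's deque-based incremental delta update of the window cost with a prefix-sum table and a closed-form per-window cost k*hs[i+k-1] - (P[i+k]-P[i]).
-- outside the precondition, e.g. on solve([3, 1, 2], -1): A returns -2, B raises IndexError; on solve([], 0): A returns 0, B returns 0
import Mathlib
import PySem

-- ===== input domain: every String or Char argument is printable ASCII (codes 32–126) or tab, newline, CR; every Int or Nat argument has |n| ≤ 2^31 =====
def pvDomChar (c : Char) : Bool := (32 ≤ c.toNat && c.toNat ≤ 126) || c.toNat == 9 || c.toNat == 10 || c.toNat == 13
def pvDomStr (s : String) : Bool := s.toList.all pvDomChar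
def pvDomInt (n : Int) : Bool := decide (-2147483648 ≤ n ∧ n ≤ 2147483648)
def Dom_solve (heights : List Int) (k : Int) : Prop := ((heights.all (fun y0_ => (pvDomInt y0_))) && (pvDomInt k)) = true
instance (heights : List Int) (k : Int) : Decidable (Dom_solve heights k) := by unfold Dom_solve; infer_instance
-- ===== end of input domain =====

-- B replaces A's deque-based incremental delta update with a prefix-sum table and a
-- closed-form per-window cost (objective: simpler); return values proved equal on Pre_ (k ≥ 1).

-- ===== PORT A =====
-- the body of A's `for i in range(k, len(heights0))` loop, with x = heights0[i];
-- state = (towers, curr, soln)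
def stepA (k : Int) (st : List Int × Int × Int) (x : Int) : List Int × Int × Int :=
  let curr := st.2.1 - (PySem.List.pyGetD st.1 (-1) 0 - PySem.List.pyGetD st.1 0 0)
  let towers := st.1.tail
  let curr2 := curr + (k - 1) * (x - PySem.List.pyGetD towers (-1) 0)
  let towers2 := towers ++ [x]
  (towers2, curr2, min st.2.2 curr2)

def solve (heights : List Int) (k : Int) : Int :=
  if k = 1 then 0
  else
    let heights0 := PySem.List.sorted heights id
    let towers := PySem.List.slice heights0 none (some k)
    let soln := (towers.map (fun t => PySem.List.pyGetD towers (-1) 0 - t)).sum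
    ((PySem.List.pyRange k (heights0.length : Int) 1).foldl
      (fun st i => stepA k st (PySem.List.pyGetD heights0 i 0)) (towers, soln, soln)).2.2

-- ===== PORT B =====
def solve_alt (heights : List Int) (k : Int) : Int :=
  if k = 1 then 0
  else
    let hs := PySem.List.sorted heights id
    let n : Int := (hs.length : Int)
    let P := hs.foldl (fun P h => P ++ [PySem.List.pyGetD P (-1) 0 + h]) [0]
    let m := min k n
    if m = 0 then 0
    else
      let best := m * PySem.List.pyGetD hs (m - 1) 0 - PySem.List.pyGetD P m 0
      (PySem.List.pyRange 1 (n - k + 1) 1).foldl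
        (fun b i => min b (k * PySem.List.pyGetD hs (i + k - 1) 0 -
          (PySem.List.pyGetD P (i + k) 0 - PySem.List.pyGetD P i 0))) best

-- ===== PRECONDITION & SPEC =====
-- Pre_ excludes k ≤ 0, where A raises IndexError on its deque operations except on scattered
-- inputs where Python's negative-index wraparound in heights0[i] yields an accidental value.
def Pre_solve (heights : List Int) (k : Int) : Prop := 1 ≤ k
instance (heights : List Int) (k : Int) : Decidable (Pre_solve heights k) := by unfold Pre_solve; infer_instance
def pvWitness_solve : List Int × Int := ([1, 3, 2], 2)

def Spec_solve (heights : List Int) (k : Int) (out : Int) : Prop := out = solve_alt heights k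
instance (heights : List Int) (k : Int) (out : Int) : Decidable (Spec_solve heights k out) := by unfold Spec_solve; infer_instance

-- ===== CLAIM (what is proved, stated in full; the proofs are below) =====
def Claim_equal_solve : Prop := ∀ (heights : List Int) (k : Int), Dom_solve heights k → Pre_solve heights k → Spec_solve heights k (solve heights k)

-- ===== LEMMAS AND PROOFS =====

-- common reference: fold the remaining elements, sliding the window and taking min of window costs
def go (K : Int) : List Int → Int → List Int → Int
  | _, s, [] => s
  | win, s, x :: rest => go K (win.tail ++ [x]) (min s (K * x - (win.tail ++ [x]).sum)) rest

lemma map_sub_sum (w : List Int) (l : Int) :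
    (w.map (fun t => l - t)).sum = (w.length : Int) * l - w.sum := by
  induction w with
  | nil => simp
  | cons h t ih => simp [ih]; ring

lemma Aloop (K : Nat) (hK : 2 ≤ K) :
    ∀ (rest win : List Int) (s : Int), win.length = K →
    (rest.foldl (stepA (K : Int)) (win, (K : Int) * PySem.List.pyGetD win (-1) 0 - win.sum, s)).2.2
      = go (K : Int) win s rest := by
  intro rest
  induction rest with
  | nil => intro win s _; simp [go]
  | cons x rest ih =>
    intro win s hlen
    cases win with
    | nil => simp at hlen; omega
    | cons h t =>
      have ht : t ≠ [] := by
        intro h0; subst h0; simp at hlen; omega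
      have hne : (h :: t) ≠ [] := by simp
      have e1 : PySem.List.pyGetD (h :: t) (-1) 0 = t.getLast ht := by
        rw [PySem.List.pyGetD_neg_one _ _ hne, List.getLast_cons ht]
      have e2 : PySem.List.pyGetD t (-1) 0 = t.getLast ht := by
        rw [PySem.List.pyGetD_neg_one _ _ ht]
      have e3 : PySem.List.pyGetD (t ++ [x]) (-1) 0 = x :=
        PySem.List.pyGetD_neg_one_append_singleton ..
      simp only [List.foldl_cons, stepA, List.tail_cons, e1, e2,
        PySem.List.pyGetD_zero_cons, List.sum_cons]
      have harith :
          (K : Int) * t.getLast ht - (h + t.sum) - (t.getLast ht - h)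
            + ((K : Int) - 1) * (x - t.getLast ht)
          = (K : Int) * PySem.List.pyGetD (t ++ [x]) (-1) 0 - (t ++ [x]).sum := by
        rw [e3]; simp [List.sum_append]; ring
      rw [harith]
      rw [ih (t ++ [x]) _ (by simp at hlen ⊢; omega)]
      have hcost : (K : Int) * PySem.List.pyGetD (t ++ [x]) (-1) 0 - (t ++ [x]).sum
          = (K : Int) * x - (t ++ [x]).sum := by rw [e3]
      rw [hcost]
      simp [go]

-- prefix-sum list: the foldl building P produces 0 :: scanFrom 0 hs
def scanFrom (c : Int) : List Int → List Int
  | [] => []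
  | h :: t => (c + h) :: scanFrom (c + h) t

lemma foldP (hs : List Int) : ∀ (pre : List Int) (c : Int),
    hs.foldl (fun P h => P ++ [PySem.List.pyGetD P (-1) 0 + h]) (pre ++ [c])
      = pre ++ c :: scanFrom c hs := by
  induction hs with
  | nil => intro pre c; simp [scanFrom]
  | cons h t ih =>
    intro pre c
    simp only [List.foldl_cons, PySem.List.pyGetD_neg_one_append_singleton]
    have := ih (pre ++ [c]) (c + h)
    simpa [scanFrom] using this

lemma scan_getD (hs : List Int) : ∀ (c : Int) (m : Nat), m ≤ hs.length →
    (c :: scanFrom c hs).getD m 0 = c + (hs.take m).sum := by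
  induction hs with
  | nil =>
    intro c m hm
    have : m = 0 := by simpa using hm
    subst this; simp [scanFrom]
  | cons h t ih =>
    intro c m hm
    cases m with
    | zero => simp
    | succ m =>
      have hih := ih (c + h) m (by simpa using hm)
      simp only [scanFrom, List.getD_cons_succ, hih, List.take_succ_cons, List.sum_cons]
      ring

lemma sum_drop_take (hs : List Int) (a b : Nat) :
    ((hs.drop a).take b).sum = (hs.take (a + b)).sum - (hs.take a).sum := by
  have : hs.take (a + b) = hs.take a ++ (hs.drop a).take b := by
    rw [← List.take_add]
  rw [this, List.sum_append]; ring

lemma window_shift (hs : List Int) (j K : Nat) (hK : 1 ≤ K) (h : j + K < hs.length) :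
    ((hs.drop j).take K).tail ++ [hs[j + K]] = (hs.drop (j + 1)).take K := by
  obtain ⟨K', rfl⟩ : ∃ K', K = K' + 1 := ⟨K - 1, by omega⟩
  have hj : j < hs.length := by omega
  rw [List.drop_eq_getElem_cons hj, List.take_succ_cons, List.tail_cons]
  have hidx : (hs.drop (j + 1))[K']? = some hs[j + (K' + 1)] := by
    rw [List.getElem?_drop]
    have : j + 1 + K' = j + (K' + 1) := by omega
    rw [this]
    exact List.getElem?_eq_getElem (by omega)
  rw [List.take_add_one, hidx]
  simp

lemma Bloop (hs : List Int) (K : Nat) (hK : 2 ≤ K) :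
    ∀ (m j : Nat) (best : Int), hs.length = j + K + m →
    (PySem.List.pyRange ((j : Int) + 1) ((hs.length : Int) - (K : Int) + 1) 1).foldl
      (fun b i => min b ((K : Int) * PySem.List.pyGetD hs (i + (K : Int) - 1) 0 -
        (PySem.List.pyGetD (0 :: scanFrom 0 hs) (i + (K : Int)) 0 -
         PySem.List.pyGetD (0 :: scanFrom 0 hs) i 0))) best
      = go (K : Int) ((hs.drop j).take K) best (hs.drop (j + K)) := by
  intro m
  induction m with
  | zero =>
    intro j best hn
    rw [PySem.List.pyRange_one_eq_nil (by omega)]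
    rw [show hs.drop (j + K) = [] from List.drop_eq_nil_of_le (by omega)]
    simp [go]
  | succ m ih =>
    intro j best hn
    have hjK : j + K < hs.length := by omega
    rw [PySem.List.pyRange_one_cons (by omega)]
    simp only [List.foldl_cons]
    -- the fetched element is hs[j + K]
    have ex : PySem.List.pyGetD hs ((j : Int) + 1 + (K : Int) - 1) 0 = hs[j + K] := by
      have e : ((j : Int) + 1 + (K : Int) - 1) = ((j + K : Nat) : Int) := by push_cast; ring
      rw [e, PySem.List.pyGetD_natCast, List.getD_eq_getElem _ _ hjK]
    -- the two prefix sums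
    have eS1 : PySem.List.pyGetD (0 :: scanFrom 0 hs) ((j : Int) + 1 + (K : Int)) 0
        = (hs.take (j + 1 + K)).sum := by
      have e : ((j : Int) + 1 + (K : Int)) = ((j + 1 + K : Nat) : Int) := by push_cast; ring
      rw [e, PySem.List.pyGetD_natCast]
      have := scan_getD hs 0 (j + 1 + K) (by omega)
      simpa using this
    have eS2 : PySem.List.pyGetD (0 :: scanFrom 0 hs) ((j : Int) + 1) 0
        = (hs.take (j + 1)).sum := by
      have e : ((j : Int) + 1) = ((j + 1 : Nat) : Int) := by push_cast; ring
      rw [e, PySem.List.pyGetD_natCast]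
      have := scan_getD hs 0 (j + 1) (by omega)
      simpa using this
    rw [ex, eS1, eS2]
    -- unfold one step of go on the right
    rw [List.drop_eq_getElem_cons hjK]
    show _ = go (K : Int) (((hs.drop j).take K).tail ++ [hs[j + K]])
      (min best ((K : Int) * hs[j + K] - (((hs.drop j).take K).tail ++ [hs[j + K]]).sum))
      (hs.drop (j + K + 1))
    rw [window_shift hs j K (by omega) hjK]
    have ecost : (((hs.drop (j + 1)).take K)).sum
        = (hs.take (j + 1 + K)).sum - (hs.take (j + 1)).sum := by
      have := sum_drop_take hs (j + 1) K
      rw [this]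
    have ecast : ((j : Int) + 1) + 1 = ((j + 1 : Nat) : Int) + 1 := by push_cast; ring
    rw [ecast]
    rw [ih (j + 1) _ (by omega)]
    rw [ecost]
    have : j + 1 + K = j + K + 1 := by omega
    rw [this]

-- takeK below is hs.take K; facts about its last element
lemma pyGetD_take_neg_one (hs : List Int) (K : Nat) (h1 : 1 ≤ K) (h2 : K ≤ hs.length) :
    PySem.List.pyGetD (hs.take K) (-1) 0 = hs[K - 1]'(by omega) := by
  have hne : hs.take K ≠ [] := by
    have : (hs.take K).length = K := by simp; omega
    intro h0; rw [h0] at this; simp at this; omega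
  have hlen : (hs.take K).length = K := by simp; omega
  rw [PySem.List.pyGetD_neg_one _ _ hne, List.getLast_eq_getElem]
  simp only [hlen, List.getElem_take]

-- ===== VERDICT (by name: the statement is the Claim_ definition above) =====
theorem solve_spec : Claim_equal_solve := by
  intro heights k _ hpre
  show solve heights k = solve_alt heights k
  by_cases hk1 : k = 1
  · simp [solve, solve_alt, hk1]
  · have hk2 : 2 ≤ k := by
      have : 1 ≤ k := hpre
      omega
    obtain ⟨K, rfl⟩ : ∃ K : Nat, k = (K : Int) := ⟨k.toNat, by omega⟩
    have hK2 : 2 ≤ K := by exact_mod_cast hk2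
    simp only [solve, solve_alt, if_neg hk1]
    set hs := PySem.List.sorted heights id with hhs
    set n := hs.length with hn
    -- A's slice is a take, A's loop is a fold over hs.drop K
    rw [PySem.List.slice_to _ (by positivity)]
    have htoNat : ((K : Int)).toNat = K := by omega
    rw [htoNat]
    rw [PySem.List.foldl_pyRange_pyGetD' hs 0 (stepA (K : Int)) _ (by positivity), htoNat]
    -- B's prefix list
    rw [show (List.foldl (fun P h => P ++ [PySem.List.pyGetD P (-1) 0 + h]) [0] hs)
        = 0 :: scanFrom 0 hs by simpa using foldP hs [] 0]
    by_cases hnK : n ≤ K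
    · -- no full second window: A's loop and B's loop are both empty
      have hdropK : hs.drop K = [] := List.drop_eq_nil_of_le (by omega)
      rw [hdropK]
      simp only [List.foldl_nil]
      have htake : hs.take K = hs := List.take_of_length_le (by omega)
      rw [htake]
      rcases Nat.eq_zero_or_pos n with h0 | hpos
      · have hsnil : hs = [] := List.eq_nil_of_length_eq_zero h0
        rw [if_pos (by omega : min (K : Int) (n : Int) = 0), hsnil]
        simp
      · have hne : hs ≠ [] := List.ne_nil_of_length_pos hpos
        have hminn : min (K : Int) (n : Int) = (n : Int) := by omega
        rw [hminn, if_neg (by omega)]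
        rw [PySem.List.pyRange_one_eq_nil (by omega), List.foldl_nil]
        rw [map_sub_sum]
        have e1 : PySem.List.pyGetD hs (-1) 0 = hs[n - 1]'(by omega) := by
          have := pyGetD_take_neg_one hs n (by omega) (by omega)
          rwa [List.take_length] at this
        have e2 : PySem.List.pyGetD hs ((n : Int) - 1) 0 = hs[n - 1]'(by omega) := by
          rw [show ((n : Int) - 1) = ((n - 1 : Nat) : Int) by omega,
            PySem.List.pyGetD_natCast, List.getD_eq_getElem _ _ (by omega)]
        have e3 : PySem.List.pyGetD (0 :: scanFrom 0 hs) ((n : Int)) 0 = hs.sum := by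
          rw [PySem.List.pyGetD_natCast]
          have := scan_getD hs 0 n (by omega)
          simpa [hn] using this
        rw [e1, e2, e3]
    · -- at least one full window slides
      have hminn : min (K : Int) (n : Int) = (K : Int) := by omega
      rw [hminn, if_neg (by omega)]
      -- A's initial curr/soln has the invariant shape
      rw [map_sub_sum]
      have hlentake : ((hs.take K).length : Int) = (K : Int) := by simp; omega
      rw [hlentake]
      rw [Aloop K hK2 (hs.drop K) (hs.take K) _ (by simp; omega)]
      -- B's initial best equals the same value
      have e1 : PySem.List.pyGetD hs ((K : Int) - 1) 0 = hs[K - 1]'(by omega) := by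
        rw [show ((K : Int) - 1) = ((K - 1 : Nat) : Int) by omega,
          PySem.List.pyGetD_natCast, List.getD_eq_getElem _ _ (by omega)]
      have e2 : PySem.List.pyGetD (0 :: scanFrom 0 hs) ((K : Int)) 0 = (hs.take K).sum := by
        rw [PySem.List.pyGetD_natCast]
        have := scan_getD hs 0 K (by omega)
        simpa using this
      rw [e1, e2, pyGetD_take_neg_one hs K (by omega) (by omega)]
      -- B's loop is go over hs.drop K starting from the first window
      have hb := Bloop hs K hK2 (n - K) 0 ((K : Int) * hs[K - 1]'(by omega) - (hs.take K).sum)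
        (by omega)
      simp only [Nat.cast_zero, zero_add, List.drop_zero] at hb
      rw [hb]
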